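-- pv_equiv track=rewrite | github.com/isanidhya/slideshare2pdf | main.py | get_best_quality_image
-- ===== SOURCE A (Python) =====
-- def get_best_quality_image(img_tag):
--     srcset = img_tag.get('srcset', '')
--
--     if not srcset:
--         return img_tag.get('src')
--
--     entries = srcset.split(',')
--
--     width_url_pairs = []
--     for entry in entries:
--         parts = entry.strip().split()
--         if len(parts) == 2:
--             url, width = parts
--             width_value = int(width.replace('w', ''))
--             width_url_pairs.append((width_value, url))
--
--     # Return the URL with the highest width
--     if width_url_pairs:
--         return max(width_url_pairs, key=lambda x: x[0])[1]
--     else: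
--         return img_tag.get('src')  # fallback
-- ===== SOURCE B (Python) =====
-- def get_best_quality_image(img_tag):
--     srcset = img_tag.get('srcset', '')
--     if not srcset:
--         return img_tag.get('src')
--     # staged: split every entry first, then parse the well-formed ones
--     parts_list = [entry.strip().split() for entry in srcset.split(',')]
--     pairs = [(int(p[1].replace('w', '')), p[0]) for p in parts_list if len(p) == 2]
--     if not pairs:
--         return img_tag.get('src')
--     # stable descending sort: ties keep original order, so [0] is the FIRST widest
--     return sorted(pairs, key=lambda p: p[0], reverse=True)[0][1]
-- ===== Notes on version B (the rewrite author's own statement) =====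
-- stated objective: alternative
-- what changed: B builds the (width, url) pairs by staged list comprehensions and selects the winner by a stable descending sort taking element [0] (first of tied widths, like max), instead of A's explicit append-loop followed by max(key=...).
import Mathlib
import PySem

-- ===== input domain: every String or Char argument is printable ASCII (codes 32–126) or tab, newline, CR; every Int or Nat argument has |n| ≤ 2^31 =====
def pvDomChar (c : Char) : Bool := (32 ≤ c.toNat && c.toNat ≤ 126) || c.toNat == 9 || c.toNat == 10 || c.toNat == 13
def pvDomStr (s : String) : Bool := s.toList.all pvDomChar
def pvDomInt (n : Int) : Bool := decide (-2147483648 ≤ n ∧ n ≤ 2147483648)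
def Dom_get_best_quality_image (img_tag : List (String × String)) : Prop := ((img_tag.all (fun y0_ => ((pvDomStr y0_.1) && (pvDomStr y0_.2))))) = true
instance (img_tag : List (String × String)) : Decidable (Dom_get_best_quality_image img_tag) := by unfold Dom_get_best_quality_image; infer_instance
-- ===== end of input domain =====

-- B replaces A's append-loop + max(key=...) by staged list comprehensions building the
-- (width, url) pairs and a stable descending sort whose first element is the winner
-- (objective: alternative — sort-based selection instead of a max scan).

-- ===== PORT A =====
-- loop body of A's 'for entry in entries' (builds width_url_pairs by appending)
def pvStepA (acc : List (Int × String)) (entry : String) : List (Int × String) :=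
  match PySem.Str.split₀ (PySem.Str.strip entry) with
  | [url, width] =>                                      -- len(parts) == 2
    match PySem.Int.ofStr? (PySem.Str.replace width "w" "") with
    | some w => acc ++ [(w, url)]
    | none => acc                                        -- ValueError: outside Pre_
  | _ => acc

def get_best_quality_image (img_tag : List (String × String)) : Option String :=
  let d := PySem.Dict.mk img_tag
  let srcset := PySem.Dict.getD d "srcset" ""
  if srcset = "" then PySem.Dict.get? d "src"
  else
    let entries := (PySem.Str.split? srcset ",").getD [] -- sep ≠ "", never none
    let width_url_pairs := entries.foldl pvStepA []
    if width_url_pairs ≠ [] then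
      (PySem.List.max? width_url_pairs (fun x => x.1)).map (fun x => x.2)
    else PySem.Dict.get? d "src"

-- ===== PORT B =====
-- body of B's second comprehension: parse one already-split entry into a (width, url) pair
def pvParseB (p : List String) : Option (Int × String) :=
  match p with
  | [u, w] => (PySem.Int.ofStr? (PySem.Str.replace w "w" "")).map (fun n => (n, u))
  | _ => none                                            -- unreachable after the len==2 filter

def get_best_quality_image_alt (img_tag : List (String × String)) : Option String :=
  let d := PySem.Dict.mk img_tag
  let srcset := PySem.Dict.getD d "srcset" ""
  if srcset = "" then PySem.Dict.get? d "src"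
  else
    let parts_list := ((PySem.Str.split? srcset ",").getD []).map
        (fun e => PySem.Str.split₀ (PySem.Str.strip e))
    -- '[... for p in parts_list if len(p) == 2]'; filterMap's none = ValueError, outside Pre_
    let pairs := (parts_list.filter (fun p => p.length == 2)).filterMap pvParseB
    if pairs = [] then PySem.Dict.get? d "src"
    else (PySem.List.sorted pairs (fun p => p.1) true).head?.map (fun p => p.2)

-- ===== PRECONDITION & SPEC =====
-- an entry is OK when it does not make Python's int() raise: if it has exactly two
-- whitespace-separated parts, the width with 'w' removed must parse as an int
def pvEntryOK (entry : String) : Bool :=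
  match PySem.Str.split₀ (PySem.Str.strip entry) with
  | [_, width] => (PySem.Int.ofStr? (PySem.Str.replace width "w" "")).isSome
  | _ => true

-- Pre_ excludes exactly the inputs on which Python A (and B) raise ValueError in int()
def Pre_get_best_quality_image (img_tag : List (String × String)) : Prop :=
  PySem.Dict.getD (PySem.Dict.mk img_tag) "srcset" "" = "" ∨
  ((PySem.Str.split? (PySem.Dict.getD (PySem.Dict.mk img_tag) "srcset" "") ",").getD []).all pvEntryOK = true
instance (img_tag : List (String × String)) : Decidable (Pre_get_best_quality_image img_tag) := by unfold Pre_get_best_quality_image; infer_instance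

def pvWitness_get_best_quality_image : (List (String × String)) :=
  [("srcset", "a.jpg 100w, b.jpg 200w"), ("src", "s.jpg")]

def Spec_get_best_quality_image (img_tag : List (String × String)) (out : Option String) : Prop := out = get_best_quality_image_alt img_tag
instance (img_tag : List (String × String)) (out : Option String) : Decidable (Spec_get_best_quality_image img_tag out) := by unfold Spec_get_best_quality_image; infer_instance

-- ===== CLAIM (what is proved, stated in full; the proofs are below) =====
def Claim_equal_get_best_quality_image : Prop := ∀ (img_tag : List (String × String)), Dom_get_best_quality_image img_tag → Pre_get_best_quality_image img_tag → Spec_get_best_quality_image img_tag (get_best_quality_image img_tag)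

-- ===== LEMMAS AND PROOFS =====

-- the pair list A accumulates by appending is exactly B's staged filter+parse pipeline
theorem pv_pairs_eq (es : List String) (acc : List (Int × String)) :
    es.foldl pvStepA acc =
      acc ++ ((es.map (fun e => PySem.Str.split₀ (PySem.Str.strip e))).filter
        (fun p => p.length == 2)).filterMap pvParseB := by
  induction es generalizing acc with
  | nil => simp
  | cons e es ih =>
    rw [List.foldl_cons, ih, List.map_cons]
    unfold pvStepA
    rcases h : PySem.Str.split₀ (PySem.Str.strip e) with _ | ⟨u, _ | ⟨w, _ | _⟩⟩
    · simp [pvParseB]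
    · simp [pvParseB]
    · rcases hw : PySem.Int.ofStr? (PySem.Str.replace w "w" "") with _ | n <;>
        simp [pvParseB, hw]
    · simp [pvParseB]

-- the head of insertBy: the new element wins exactly when 'before' puts it in front
theorem pv_head_insertBy {α : Type} (before : α → α → Bool) (x : α) (acc : List α) :
    (PySem.List.insertBy before x acc).head? =
      match acc with
      | [] => some x
      | y :: _ => if before x y then some x else some y := by
  cases acc with
  | nil => rfl
  | cons y ys => simp only [PySem.List.insertBy]; split <;> simp_all

-- the head of the insertion-sort fold is the option-level running-best fold
theorem pv_foldl_insertBy_head {α : Type} (before : α → α → Bool) (es : List α) (acc : List α) :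
    (es.foldl (fun a x => PySem.List.insertBy before x a) acc).head? =
      es.foldl
        (fun (m : Option α) x =>
          match m with
          | none => some x
          | some y => if before x y then some x else some y) acc.head? := by
  induction es generalizing acc with
  | nil => rfl
  | cons e es ih =>
    rw [List.foldl_cons, List.foldl_cons, ih, pv_head_insertBy]
    cases acc with
    | nil => rfl
    | cons y ys => simp only [List.head?_cons]

-- head of Python's stable descending sort = first maximal element = max(key=...)
theorem pv_head_sorted_rev_eq_max? (xs : List (Int × String)) :
    (PySem.List.sorted xs (fun p => p.1) true).head? = PySem.List.max? xs (fun p => p.1) := by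
  unfold PySem.List.sorted PySem.List.max?
  rw [pv_foldl_insertBy_head]
  simp only [List.head?_nil]
  congr 1
  funext m x
  cases m <;> simp

-- ===== VERDICT (by name: the statement is the Claim_ definition above) =====
theorem get_best_quality_image_spec : Claim_equal_get_best_quality_image := by
  intro img_tag _ _
  unfold Spec_get_best_quality_image get_best_quality_image get_best_quality_image_alt
  by_cases h : PySem.Dict.getD (PySem.Dict.mk img_tag) "srcset" "" = ""
  · simp only [h, if_pos]
  · simp only [h, if_false]
    set es := (PySem.Str.split? (PySem.Dict.getD (PySem.Dict.mk img_tag) "srcset" "") ",").getD [] with hes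
    rw [pv_pairs_eq es [], List.nil_append]
    set pairs := ((es.map (fun e => PySem.Str.split₀ (PySem.Str.strip e))).filter
        (fun p => p.length == 2)).filterMap pvParseB with hp
    by_cases hnil : pairs = []
    · simp [hnil]
    · simp only [hnil, if_false, ne_eq, not_false_iff, if_pos]
      rw [pv_head_sorted_rev_eq_max?]
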